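-- pv_equiv track=rewrite | github.com/giotto-ai/condorcet-method | condorcet.py | _compute_p
-- ===== SOURCE A (Python) =====
-- def _compute_p(d, candidate_names):
--     '''Computes the p array in the Schulze method.
--
--         p[V,W] is the strength of the strongest path from candidate V to W.
--     '''
--
--     # taken directly from wikipedia: https://en.wikipedia.org/wiki/Schulze_method#Implementation
--     p = {}
--     for candidate_name1 in candidate_names:
--         for candidate_name2 in candidate_names:
--             if candidate_name1 != candidate_name2:
--                 # get the value from the d matrix or default it to 0
--                 strength = d.get((candidate_name1, candidate_name2), 0)
--                 if strength > d.get((candidate_name2, candidate_name1), 0):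
--                     p[candidate_name1, candidate_name2] = strength
--                 else:
--                     p[candidate_name1, candidate_name2] = 0
--
--     for candidate_name1 in candidate_names:
--         for candidate_name2 in candidate_names:
--             if candidate_name1 != candidate_name2:
--                 for candidate_name3 in candidate_names:
--                     if (candidate_name1 != candidate_name3) and (candidate_name2 != candidate_name3):
--                         curr_value = p.get((candidate_name2, candidate_name3), 0)
--                         new_value = min(
--                                         p.get((candidate_name2, candidate_name1), 0),
--                                         p.get((candidate_name1, candidate_name3), 0))
--                         p[candidate_name2, candidate_name3] = max(curr_value,new_value)
--     return p
-- ===== SOURCE B (Python) =====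
-- def _compute_p(d, candidate_names):
--     '''Computes the p array in the Schulze method (strongest-path matrix) by a
--     per-source widest-path (bottleneck Dijkstra) search instead of Floyd-Warshall.'''
--     names = []
--     for name in candidate_names:
--         if name not in names:
--             names.append(name)
--
--     def direct(v, w):
--         s = d.get((v, w), 0)
--         return s if s > d.get((w, v), 0) else 0
--
--     p = {}
--     for v in names:
--         targets = [w for w in names if w != v]
--         width = {w: direct(v, w) for w in targets}
--         unsettled = list(targets)
--         while unsettled:
--             u = max(unsettled, key=lambda t: width[t])
--             unsettled.remove(u)
--             wu = width[u]
--             for w in targets: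
--                 cand = min(wu, direct(u, w))
--                 if cand > width[w]:
--                     width[w] = cand
--         for w in targets:
--             p[(v, w)] = width[w]
--     return p
-- ===== Notes on version B (the rewrite author's own statement) =====
-- stated objective: alternative
-- what changed: B replaces A's all-pairs in-place Floyd-Warshall triple loop by a per-source widest-path (bottleneck Dijkstra) search over the deduplicated candidates: for each source it keeps a width table and an unsettled frontier, repeatedly settles the unsettled target of maximal current width and relaxes every target through it with min(settled width, direct strength), then emits the per-source rows.
import Mathlib
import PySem

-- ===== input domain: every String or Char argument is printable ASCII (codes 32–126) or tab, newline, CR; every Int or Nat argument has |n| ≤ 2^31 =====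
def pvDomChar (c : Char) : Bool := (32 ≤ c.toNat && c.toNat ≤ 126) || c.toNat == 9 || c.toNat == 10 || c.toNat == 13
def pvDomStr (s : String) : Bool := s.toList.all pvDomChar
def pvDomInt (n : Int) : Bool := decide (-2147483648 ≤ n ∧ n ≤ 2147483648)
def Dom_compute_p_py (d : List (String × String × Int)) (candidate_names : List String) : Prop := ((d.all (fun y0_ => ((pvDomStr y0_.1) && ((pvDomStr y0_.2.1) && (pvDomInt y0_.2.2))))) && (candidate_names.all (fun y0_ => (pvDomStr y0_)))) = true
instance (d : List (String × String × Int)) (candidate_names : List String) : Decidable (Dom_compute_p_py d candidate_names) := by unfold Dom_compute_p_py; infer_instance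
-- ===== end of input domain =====

-- B replaces A's in-place Floyd-Warshall triple loop by a per-source widest-path (bottleneck
-- Dijkstra) search over the deduplicated candidates (objective: alternative).

set_option maxHeartbeats 1000000


-- ===== PORT A =====
-- d.get((x, y), 0) on the input dict (association list, first match wins; a real Python dict has unique keys)
def pvDget (d : List (String × String × Int)) (k : String × String) : Int :=
  match d.find? (fun t => t.1 == k.1 && t.2.1 == k.2) with
  | some t => t.2.2
  | none => 0

def compute_p_py (d : List (String × String × Int)) (candidate_names : List String) : List (String × String × Int) :=
  let p1 : PySem.Dict (String × String) Int :=
    candidate_names.foldl (fun p c1 =>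
      candidate_names.foldl (fun p c2 =>
        if c1 ≠ c2 then
          let strength := pvDget d (c1, c2)
          if strength > pvDget d (c2, c1) then p.insert (c1, c2) strength
          else p.insert (c1, c2) 0
        else p) p) PySem.Dict.empty
  let p2 : PySem.Dict (String × String) Int :=
    candidate_names.foldl (fun p c1 =>
      candidate_names.foldl (fun p c2 =>
        if c1 ≠ c2 then
          candidate_names.foldl (fun p c3 =>
            if c1 ≠ c3 ∧ c2 ≠ c3 then
              let curr := p.getD (c2, c3) 0
              let nv := min (p.getD (c2, c1) 0) (p.getD (c1, c3) 0)
              p.insert (c2, c3) (max curr nv)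
            else p) p
        else p) p) p1
  p2.items.map (fun q => (q.1.1, q.1.2, q.2))

-- ===== PORT B =====
-- Source B's local helper direct(v, w)
def pvDirect (d : List (String × String × Int)) (v w : String) : Int :=
  if pvDget d (v, w) > pvDget d (w, v) then pvDget d (v, w) else 0

-- Source B's `while unsettled:` loop.  Each pass removes exactly one member of `unsettled`
-- (the settled `u`, via list.remove), so the loop runs exactly `unsettled.length` times:
-- it is ported with that number as structural fuel.  `max(unsettled, key=...)` is
-- PySem.List.max? (first maximal element); `width[t]` lookups are getD (the key is
-- always present).  `unsettled.remove(u)` is PySem.List.remove? (u is always a member).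
def pvRun (d : List (String × String × Int)) (targets : List String) :
    Nat → PySem.Dict String Int → List String → PySem.Dict String Int
  | 0, width, _ => width
  | fuel+1, width, unsettled =>
    match PySem.List.max? unsettled (fun t => width.getD t 0) with
    | none => width
    | some u =>
      let unsettled' := (PySem.List.remove? unsettled u).getD []
      let wu := width.getD u 0
      let width' := targets.foldl (fun dd w =>
          let cand := min wu (pvDirect d u w)
          if cand > dd.getD w 0 then dd.insert w cand else dd) width
      pvRun d targets fuel width' unsettled'

def compute_p_py_alt (d : List (String × String × Int)) (candidate_names : List String) : List (String × String × Int) :=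
  let names := candidate_names.foldl (fun ns name => if name ∈ ns then ns else ns ++ [name]) []
  let p : PySem.Dict (String × String) Int :=
    names.foldl (fun p v =>
      let targets := names.filter (fun w => decide (w ≠ v))
      let width0 := targets.foldl (fun dd w => dd.insert w (pvDirect d v w)) PySem.Dict.empty
      let width := pvRun d targets targets.length width0 targets
      targets.foldl (fun p w => p.insert (v, w) (width.getD w 0)) p) PySem.Dict.empty
  p.items.map (fun q => (q.1.1, q.1.2, q.2))

-- ===== PRECONDITION & SPEC =====
def Spec_compute_p_py (d : List (String × String × Int)) (candidate_names : List String) (out : List (String × String × Int)) : Prop := out = compute_p_py_alt d candidate_names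
instance (d : List (String × String × Int)) (candidate_names : List String) (out : List (String × String × Int)) : Decidable (Spec_compute_p_py d candidate_names out) := by unfold Spec_compute_p_py; infer_instance

-- ===== CLAIM (what is proved, stated in full; the proofs are below) =====
def Claim_equal_compute_p_py : Prop := ∀ (d : List (String × String × Int)) (candidate_names : List String), Dom_compute_p_py d candidate_names → Spec_compute_p_py d candidate_names (compute_p_py d candidate_names)

-- ===== LEMMAS AND PROOFS =====

-- ---------- ordered dedup (first occurrences) ----------

def pvUniq (l : List String) : List String :=
  l.foldl (fun ns name => if name ∈ ns then ns else ns ++ [name]) []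

def pvDedupFrom (seen : List String) : List String → List String
  | [] => []
  | x :: t => if x ∈ seen then pvDedupFrom seen t else x :: pvDedupFrom (x :: seen) t

theorem pvDedupFrom_congr : ∀ (l s1 s2 : List String), (∀ a, a ∈ s1 ↔ a ∈ s2) →
    pvDedupFrom s1 l = pvDedupFrom s2 l := by
  intro l
  induction l with
  | nil => intro s1 s2 _; rfl
  | cons x t ih =>
    intro s1 s2 hs
    simp only [pvDedupFrom]
    by_cases hx : x ∈ s1
    · rw [if_pos hx, if_pos ((hs x).mp hx), ih s1 s2 hs]
    · rw [if_neg hx, if_neg (fun hx2 => hx ((hs x).mpr hx2)),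
        ih (x :: s1) (x :: s2) (by intro a; simp [hs a])]

theorem pvUniq_acc : ∀ (l acc : List String),
    l.foldl (fun ns name => if name ∈ ns then ns else ns ++ [name]) acc = acc ++ pvDedupFrom acc l := by
  intro l
  induction l with
  | nil => intro acc; simp [pvDedupFrom]
  | cons x t ih =>
    intro acc
    simp only [List.foldl_cons, pvDedupFrom]
    by_cases hx : x ∈ acc
    · rw [if_pos hx, if_pos hx, ih acc]
    · rw [if_neg hx, if_neg hx, ih (acc ++ [x]),
        pvDedupFrom_congr t (acc ++ [x]) (x :: acc) (by intro a; simp [or_comm])]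
      simp

theorem pvUniq_eq (l : List String) : pvUniq l = pvDedupFrom [] l := by
  unfold pvUniq
  rw [pvUniq_acc l []]
  simp

theorem mem_pvDedupFrom : ∀ (l seen : List String) (a : String),
    a ∈ pvDedupFrom seen l ↔ (a ∈ l ∧ a ∉ seen) := by
  intro l
  induction l with
  | nil => intro seen a; simp [pvDedupFrom]
  | cons x t ih =>
    intro seen a
    simp only [pvDedupFrom]
    by_cases hx : x ∈ seen
    · rw [if_pos hx, ih]
      constructor
      · exact fun ⟨h1, h2⟩ => ⟨by simp [h1], h2⟩
      · rintro ⟨h1, h2⟩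
        rcases List.mem_cons.mp h1 with rfl | h1
        · exact absurd hx h2
        · exact ⟨h1, h2⟩
    · rw [if_neg hx]
      simp only [List.mem_cons, ih]
      constructor
      · rintro (rfl | ⟨h1, h2⟩)
        · exact ⟨Or.inl rfl, hx⟩
        · refine ⟨Or.inr h1, fun hs => h2 (by simp [hs])⟩
      · rintro ⟨rfl | h1, h2⟩
        · exact Or.inl rfl
        · by_cases hax : a = x
          · exact Or.inl hax
          · exact Or.inr ⟨h1, by simp [hax, h2]⟩

theorem nodup_pvDedupFrom : ∀ (l seen : List String), (pvDedupFrom seen l).Nodup := by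
  intro l
  induction l with
  | nil => intro seen; exact List.nodup_nil
  | cons x t ih =>
    intro seen
    simp only [pvDedupFrom]
    by_cases hx : x ∈ seen
    · rw [if_pos hx]; exact ih seen
    · rw [if_neg hx]
      refine List.nodup_cons.mpr ⟨?_, ih (x :: seen)⟩
      intro hmem
      exact ((mem_pvDedupFrom t (x :: seen) x).mp hmem).2 (by simp)

theorem pvUniq_nodup (l : List String) : (pvUniq l).Nodup := by
  rw [pvUniq_eq]; exact nodup_pvDedupFrom l []

theorem mem_pvUniq (l : List String) (a : String) : a ∈ pvUniq l ↔ a ∈ l := by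
  rw [pvUniq_eq, mem_pvDedupFrom]
  simp

-- ---------- generic fold-over-duplicates = fold-over-dedup ----------

theorem foldl_dedup {σ : Type} (g : σ → String → σ) (Q : σ → Prop) (P : σ → String → Prop)
    (hQ : ∀ s x, Q s → Q (g s x))
    (hstep : ∀ s x, Q s → P s x → g s x = s)
    (hset : ∀ s x, Q s → P (g s x) x)
    (hpres : ∀ s x y, Q s → P s y → P (g s x) y) :
    ∀ (l seen : List String) (s : σ), Q s → (∀ x ∈ seen, P s x) →
      l.foldl g s = (pvDedupFrom seen l).foldl g s := by
  intro l
  induction l with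
  | nil => intro seen s _ _; rfl
  | cons x t ih =>
    intro seen s hQs hseen
    simp only [List.foldl_cons, pvDedupFrom]
    by_cases hx : x ∈ seen
    · rw [if_pos hx, hstep s x hQs (hseen x hx)]
      exact ih seen s hQs hseen
    · rw [if_neg hx]
      simp only [List.foldl_cons]
      refine ih (x :: seen) (g s x) (hQ s x hQs) ?_
      intro y hy
      rcases List.mem_cons.mp hy with rfl | hy
      · exact hset s y hQs
      · exact hpres s x y hQs (hseen y hy)

-- ---------- string-level canonical items list ----------

def pvCanonS (N : List String) (w : String → String → Int) : List ((String × String) × Int) :=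
  N.flatMap (fun x => (N.filter (fun y => decide (x ≠ y))).map (fun y => ((x, y), w x y)))

theorem flatMap_congr' {α β : Type} (l : List α) (f g : α → List β)
    (h : ∀ a ∈ l, f a = g a) : l.flatMap f = l.flatMap g := by
  induction l with
  | nil => rfl
  | cons a l ih =>
    simp only [List.flatMap_cons]
    rw [h a (by simp), ih (fun a ha => h a (by simp [ha]))]

theorem canonS_congr (N : List String) (v w : String → String → Int)
    (h : ∀ x ∈ N, ∀ y ∈ N, x ≠ y → v x y = w x y) :
    pvCanonS N v = pvCanonS N w := by
  unfold pvCanonS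
  apply flatMap_congr'
  intro x hx
  apply List.map_congr_left
  intro y hy
  obtain ⟨hyN, hd⟩ := List.mem_filter.mp hy
  have hne : x ≠ y := by simpa using hd
  rw [h x hx y hyN hne]

theorem canonS_keys_nodup (N : List String) (hN : N.Nodup) (v : String → String → Int) :
    ((pvCanonS N v).map (fun q => q.1)).Nodup := by
  unfold pvCanonS
  rw [List.map_flatMap, List.nodup_flatMap]
  refine ⟨?_, ?_⟩
  · intro x _
    rw [List.map_map]
    apply List.Nodup.map_on
    · intro a _ b _ hab
      simp only [Function.comp] at hab
      exact congrArg Prod.snd hab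
    · exact List.Nodup.filter _ hN
  · have key : ∀ (l : List String), l.Nodup →
        List.Pairwise (Function.onFun List.Disjoint (fun x =>
          List.map (fun q => q.1)
            (List.map (fun y => ((x, y), v x y))
              (List.filter (fun y => decide (x ≠ y)) N)))) l := by
      intro l
      induction l with
      | nil => intro _; exact List.Pairwise.nil
      | cons a t ih =>
        intro hnd
        refine List.Pairwise.cons ?_ (ih (List.nodup_cons.mp hnd).2)
        intro b hb
        have hab : a ≠ b := fun e => (List.nodup_cons.mp hnd).1 (e ▸ hb)
        intro key hka hkb
        simp only [List.map_map, List.mem_map, Function.comp] at hka hkb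
        obtain ⟨q1, _, hk1⟩ := hka
        obtain ⟨q2, _, hk2⟩ := hkb
        have e1 : a = key.1 := congrArg Prod.fst hk1
        have e2 : b = key.1 := congrArg Prod.fst hk2
        exact hab (e1.trans e2.symm)
    exact key N hN

theorem canonS_mem (N : List String) (v : String → String → Int) {x y : String}
    (hx : x ∈ N) (hy : y ∈ N) (hxy : x ≠ y) :
    ((x, y), v x y) ∈ pvCanonS N v := by
  unfold pvCanonS
  refine List.mem_flatMap.mpr ⟨x, hx, ?_⟩
  refine List.mem_map.mpr ⟨y, ?_, rfl⟩
  exact List.mem_filter.mpr ⟨hy, by simpa using hxy⟩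

theorem canonS_getD (N : List String) (hN : N.Nodup) (v : String → String → Int) {x y : String}
    (hx : x ∈ N) (hy : y ∈ N) (hxy : x ≠ y) :
    (PySem.Dict.mk (pvCanonS N v)).getD (x, y) 0 = v x y := by
  refine PySem.Dict.getD_of_mem_items _ (canonS_mem N v hx hy hxy) ?_ 0
  show ((pvCanonS N v).map (fun q => q.1)).Nodup
  exact canonS_keys_nodup N hN v

theorem canonS_insert (N : List String) (_hN : N.Nodup) (v : String → String → Int) {a b : String}
    (ha : a ∈ N) (hb : b ∈ N) (hab : a ≠ b) (z : Int) :
    (PySem.Dict.mk (pvCanonS N v)).insert (a, b) z =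
      PySem.Dict.mk (pvCanonS N (fun x y => if x = a ∧ y = b then z else v x y)) := by
  have hcont : (PySem.Dict.mk (pvCanonS N v)).contains (a, b) = true := by
    rw [PySem.Dict.contains_eq_decide_mem_keys]
    simp only [decide_eq_true_eq]
    show (a, b) ∈ (pvCanonS N v).map (fun q => q.1)
    exact List.mem_map.mpr ⟨_, canonS_mem N v ha hb hab, rfl⟩
  apply PySem.Dict.ext
  rw [PySem.Dict.items_insert_of_contains _ _ hcont]
  show List.map _ (pvCanonS N v) = pvCanonS N _
  unfold pvCanonS
  rw [List.map_flatMap]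
  apply flatMap_congr'
  intro x _
  rw [List.map_map]
  apply List.map_congr_left
  intro y _
  simp only [Function.comp]
  by_cases hcase : x = a ∧ y = b
  · obtain ⟨rfl, rfl⟩ := hcase
    simp
  · have hne : ((x, y) : String × String) ≠ (a, b) := by
      intro e
      injection e with e1 e2
      exact hcase ⟨e1, e2⟩
    simp only [beq_iff_eq, if_neg hne, if_neg hcase]

-- ---------- dict helper: inserting the stored value changes nothing ----------

theorem insert_same (p : PySem.Dict (String × String) Int) (k : String × String) (v : Int)
    (hnd : p.keys.Nodup) (hv : p.get? k = some v) : p.insert k v = p := by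
  have hcont : p.contains k = true := by
    rw [PySem.Dict.contains_eq_isSome_get?, hv]
    rfl
  apply PySem.Dict.ext
  rw [PySem.Dict.items_insert_of_contains _ _ hcont]
  have hpt : ∀ q ∈ p.items, (if (q.1 == k) = true then (k, v) else q) = q := by
    intro q hq
    obtain ⟨q1, q2⟩ := q
    by_cases hqk : q1 = k
    · subst hqk
      have hget : p.get? q1 = some q2 := PySem.Dict.get?_of_mem_items p hq hnd
      rw [hv] at hget
      injection hget with he
      simp [he]
    · simp [hqk]
  rw [List.map_congr_left hpt]
  simp

-- ---------- phase 1 of A (direct strengths) ----------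

theorem rowfold_other (d : List (String × String × Int)) (x : String) :
    ∀ (js : List String) (p : PySem.Dict (String × String) Int) (key : String × String), key.1 ≠ x →
    (js.foldl (fun p y => if x ≠ y then p.insert (x, y) (pvDirect d x y) else p) p).get? key = p.get? key := by
  intro js
  induction js with
  | nil => intro p key _; rfl
  | cons y t ih =>
    intro p key hk
    simp only [List.foldl_cons]
    rw [ih _ key hk]
    by_cases hxy : x ≠ y
    · rw [if_pos hxy]
      exact PySem.Dict.get?_insert_of_ne _ _ (fun e => hk (congrArg Prod.fst e))
    · rw [if_neg hxy]

theorem rowfold_nodup (d : List (String × String × Int)) (x : String) :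
    ∀ (js : List String) (p : PySem.Dict (String × String) Int), p.keys.Nodup →
    ((js.foldl (fun p y => if x ≠ y then p.insert (x, y) (pvDirect d x y) else p) p)).keys.Nodup := by
  intro js
  induction js with
  | nil => intro p hp; exact hp
  | cons y t ih =>
    intro p hp
    simp only [List.foldl_cons]
    refine ih _ ?_
    by_cases hxy : x ≠ y
    · rw [if_pos hxy]
      exact PySem.Dict.nodup_keys_insert p _ _ hp
    · rw [if_neg hxy]; exact hp

theorem rowfold_notin (d : List (String × String × Int)) (x : String) :
    ∀ (js : List String) (p : PySem.Dict (String × String) Int) (y : String), y ∉ js →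
    (js.foldl (fun p y => if x ≠ y then p.insert (x, y) (pvDirect d x y) else p) p).get? (x, y) = p.get? (x, y) := by
  intro js
  induction js with
  | nil => intro p y _; rfl
  | cons z t ih =>
    intro p y hy
    have hyt : y ∉ t := fun h => hy (by simp [h])
    have hyz : y ≠ z := fun h => hy (by simp [h])
    simp only [List.foldl_cons]
    rw [ih _ y hyt]
    by_cases hxz : x ≠ z
    · rw [if_pos hxz]
      exact PySem.Dict.get?_insert_of_ne _ _ (fun e => hyz (congrArg Prod.snd e))
    · rw [if_neg hxz]

theorem rowfold_self (d : List (String × String × Int)) (x : String) :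
    ∀ (js : List String) (p : PySem.Dict (String × String) Int) (y : String), y ∈ js → x ≠ y →
    (js.foldl (fun p y => if x ≠ y then p.insert (x, y) (pvDirect d x y) else p) p).get? (x, y) = some (pvDirect d x y) := by
  intro js
  induction js with
  | nil => intro p y hy _; exact absurd hy (List.not_mem_nil)
  | cons z t ih =>
    intro p y hy hxy
    simp only [List.foldl_cons]
    by_cases hyt : y ∈ t
    · exact ih _ y hyt hxy
    · have hyz : y = z := by
        rcases List.mem_cons.mp hy with h | h
        · exact h
        · exact absurd h hyt
      subst hyz
      rw [rowfold_notin d x t _ y hyt, if_pos hxy]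
      exact PySem.Dict.get?_insert_self _ _ _

theorem rowfold_noop (d : List (String × String × Int)) (x : String) :
    ∀ (js : List String) (p : PySem.Dict (String × String) Int), p.keys.Nodup →
    (∀ y ∈ js, x ≠ y → p.get? (x, y) = some (pvDirect d x y)) →
    js.foldl (fun p y => if x ≠ y then p.insert (x, y) (pvDirect d x y) else p) p = p := by
  intro js
  induction js with
  | nil => intro p _ _; rfl
  | cons y t ih =>
    intro p hp hP
    simp only [List.foldl_cons]
    have hbody : (if x ≠ y then p.insert (x, y) (pvDirect d x y) else p) = p := by
      by_cases hxy : x ≠ y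
      · rw [if_pos hxy]
        exact insert_same p (x, y) _ hp (hP y (by simp) hxy)
      · rw [if_neg hxy]
    rw [hbody]
    exact ih p hp (fun y hy => hP y (by simp [hy]))

theorem rowfold_dedup (d : List (String × String × Int)) (x : String) (names : List String) :
    ∀ (p : PySem.Dict (String × String) Int), p.keys.Nodup →
    names.foldl (fun p y => if x ≠ y then p.insert (x, y) (pvDirect d x y) else p) p =
    (pvUniq names).foldl (fun p y => if x ≠ y then p.insert (x, y) (pvDirect d x y) else p) p := by
  intro p hp
  rw [pvUniq_eq]
  refine foldl_dedup _ (fun p => p.keys.Nodup)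
    (fun p y => x = y ∨ p.get? (x, y) = some (pvDirect d x y))
    ?_ ?_ ?_ ?_ names [] p hp (by simp)
  · intro p y hQ
    by_cases hxy : x ≠ y
    · rw [if_pos hxy]; exact PySem.Dict.nodup_keys_insert p _ _ hQ
    · rw [if_neg hxy]; exact hQ
  · intro p y hQ hP
    rcases hP with rfl | hP
    · rw [if_neg (fun h => h rfl)]
    · by_cases hxy : x ≠ y
      · rw [if_pos hxy]; exact insert_same p (x, y) _ hQ hP
      · rw [if_neg hxy]
  · intro p y _
    by_cases hxy : x ≠ y
    · right; rw [if_pos hxy]; exact PySem.Dict.get?_insert_self _ _ _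
    · left; exact not_not.mp (fun h => hxy (fun e => h e))
  · intro p z y _ hP
    rcases hP with rfl | hP
    · left; rfl
    · right
      by_cases hxz : x ≠ z
      · rw [if_pos hxz]
        by_cases hzy : z = y
        · subst hzy
          exact PySem.Dict.get?_insert_self _ _ _
        · rw [PySem.Dict.get?_insert_of_ne _ _ (fun e => hzy ((congrArg Prod.snd e)).symm)]
          exact hP
      · rw [if_neg hxz]; exact hP

theorem phase1_dedup (d : List (String × String × Int)) (names : List String) :
    names.foldl (fun p x => names.foldl (fun p y => if x ≠ y then p.insert (x, y) (pvDirect d x y) else p) p) PySem.Dict.empty =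
    (pvUniq names).foldl (fun p x => names.foldl (fun p y => if x ≠ y then p.insert (x, y) (pvDirect d x y) else p) p) PySem.Dict.empty := by
  rw [pvUniq_eq]
  refine foldl_dedup _ (fun p => p.keys.Nodup)
    (fun p x => ∀ y ∈ names, x ≠ y → p.get? (x, y) = some (pvDirect d x y))
    ?_ ?_ ?_ ?_ names [] PySem.Dict.empty ?_ (by simp)
  · intro p x hQ
    exact rowfold_nodup d x names p hQ
  · intro p x hQ hP
    exact rowfold_noop d x names p hQ hP
  · intro p x _
    intro y hy hxy
    exact rowfold_self d x names p y hy hxy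
  · intro p x y hQ hP
    by_cases hyx : y = x
    · subst hyx
      intro y2 hy2 hyy2
      exact rowfold_self d y names p y2 hy2 hyy2
    · intro y2 hy2 hyy2
      rw [rowfold_other d x names p (y, y2) hyx]
      exact hP y2 hy2 hyy2
  · show (([] : List ((String × String) × Int)).map (fun q => q.1)).Nodup
    exact List.nodup_nil

theorem row_insertS (d : List (String × String × Int)) (x : String) :
    ∀ (js : List String) (L : List ((String × String) × Int)), js.Nodup →
      (∀ y ∈ js, (x, y) ∉ L.map (fun q => q.1)) →
      js.foldl (fun p y => if x ≠ y then p.insert (x, y) (pvDirect d x y) else p) (PySem.Dict.mk L) =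
      PySem.Dict.mk (L ++ (js.filter (fun y => decide (x ≠ y))).map (fun y => ((x, y), pvDirect d x y))) := by
  intro js
  induction js with
  | nil => intro L _ _; simp
  | cons y t ih =>
    intro L hnd hfresh
    have hyt : y ∉ t := (List.nodup_cons.mp hnd).1
    simp only [List.foldl_cons]
    by_cases hxy : x ≠ y
    · rw [if_pos hxy]
      have hcont : (PySem.Dict.mk L).contains (x, y) = false := by
        rw [PySem.Dict.contains_eq_decide_mem_keys]
        simp only [decide_eq_false_iff_not]
        show (x, y) ∉ L.map (fun q => q.1)
        exact hfresh y (by simp)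
      have hins : (PySem.Dict.mk L).insert (x, y) (pvDirect d x y) =
          PySem.Dict.mk (L ++ [((x, y), pvDirect d x y)]) := by
        apply PySem.Dict.ext
        rw [PySem.Dict.items_insert_of_not_contains _ _ hcont]
      rw [hins]
      have hfr : ∀ y' ∈ t, (x, y') ∉ (L ++ [((x, y), pvDirect d x y)]).map (fun q => q.1) := by
        intro y' hy' hmem
        rw [List.map_append] at hmem
        rcases List.mem_append.mp hmem with hm | hm
        · exact hfresh y' (by simp [hy']) hm
        · simp only [List.map_cons, List.map_nil, List.mem_singleton] at hm
          injection hm with e1 e2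
          exact hyt (e2 ▸ hy')
      rw [ih (L ++ [((x, y), pvDirect d x y)]) (List.nodup_cons.mp hnd).2 hfr]
      rw [List.filter_cons_of_pos (by simpa using hxy), List.map_cons]
      simp [List.append_assoc]
    · rw [if_neg hxy]
      rw [ih L (List.nodup_cons.mp hnd).2 (fun y' hy' => hfresh y' (by simp [hy']))]
      rw [List.filter_cons_of_neg (by simpa using hxy)]

theorem outer_insertS (d : List (String × String × Int)) (names : List String) :
    ∀ (is : List String) (L : List ((String × String) × Int)), is.Nodup →
      ((L.map (fun q => q.1)).Nodup) →
      (∀ x ∈ is, ∀ q ∈ L.map (fun q => q.1), q.1 ≠ x) →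
      is.foldl (fun p x => names.foldl (fun p y => if x ≠ y then p.insert (x, y) (pvDirect d x y) else p) p) (PySem.Dict.mk L) =
      PySem.Dict.mk (L ++ is.flatMap (fun x =>
        ((pvUniq names).filter (fun y => decide (x ≠ y))).map (fun y => ((x, y), pvDirect d x y)))) := by
  intro is
  induction is with
  | nil => intro L _ _ _; simp
  | cons x t ih =>
    intro L hnd hLnd hfresh
    have hxt : x ∉ t := (List.nodup_cons.mp hnd).1
    simp only [List.foldl_cons]
    rw [rowfold_dedup d x names (PySem.Dict.mk L) (by
      show (L.map (fun q => q.1)).Nodup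
      exact hLnd)]
    rw [row_insertS d x (pvUniq names) L (pvUniq_nodup names) (by
      intro y _ hmem
      exact (hfresh x (by simp) _ hmem) rfl)]
    have hrowkeys : ∀ q ∈ (((pvUniq names).filter (fun y => decide (x ≠ y))).map
        (fun y => ((x, y), pvDirect d x y))).map (fun q => q.1), q.1 = x := by
      intro q hq
      simp only [List.map_map, List.mem_map, Function.comp] at hq
      obtain ⟨y, _, hy⟩ := hq
      rw [← hy]
    have hrownd : ((((pvUniq names).filter (fun y => decide (x ≠ y))).map
        (fun y => ((x, y), pvDirect d x y))).map (fun q => q.1)).Nodup := by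
      rw [List.map_map]
      apply List.Nodup.map_on
      · intro a _ b _ hab
        simp only [Function.comp] at hab
        exact congrArg Prod.snd hab
      · exact List.Nodup.filter _ (pvUniq_nodup names)
    have hL'nd : (((L ++ ((pvUniq names).filter (fun y => decide (x ≠ y))).map
        (fun y => ((x, y), pvDirect d x y)))).map (fun q => q.1)).Nodup := by
      rw [List.map_append]
      refine List.Nodup.append hLnd hrownd ?_
      intro k hk1 hk2
      exact (hfresh x (by simp) k hk1) (hrowkeys k hk2)
    rw [ih _ (List.nodup_cons.mp hnd).2 hL'nd (by
      intro x' hx' q hq hq1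
      rw [List.map_append] at hq
      rcases List.mem_append.mp hq with hm | hm
      · exact hfresh x' (by simp [hx']) q hm hq1
      · have := hrowkeys q hm
        rw [this] at hq1
        exact hxt (hq1 ▸ hx'))]
    rw [List.flatMap_cons]
    simp [List.append_assoc]

theorem phase1_total (d : List (String × String × Int)) (names : List String) :
    names.foldl (fun p x => names.foldl (fun p y => if x ≠ y then p.insert (x, y) (pvDirect d x y) else p) p) PySem.Dict.empty =
    PySem.Dict.mk (pvCanonS (pvUniq names) (pvDirect d)) := by
  rw [phase1_dedup d names]
  have he : (PySem.Dict.empty : PySem.Dict (String × String) Int) = PySem.Dict.mk [] := rfl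
  rw [he, outer_insertS d names (pvUniq names) [] (pvUniq_nodup names) (by simp) (by simp)]
  rfl

-- ---------- phase 2 of A (Floyd-Warshall passes), string level ----------

def stepFS (f : String → String → Int) (x : String) : String → String → Int :=
  fun a b => if a ≠ b ∧ a ≠ x ∧ b ≠ x then max (f a b) (min (f a x) (f x b)) else f a b

theorem innerS (N : List String) (hN : N.Nodup) (f : String → String → Int)
    (x a : String) (hx : x ∈ N) (ha : a ∈ N) (hax : a ≠ x) :
    ∀ (js : List String) (w : String → String → Int),
      (∀ j ∈ js, j ∈ N) →
      w a x = f a x → (∀ b, w x b = f x b) →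
      (∀ j ∈ js, w a j = f a j ∨ w a j = stepFS f x a j) →
      js.foldl (fun p b =>
          if x ≠ b ∧ a ≠ b then
            p.insert (a, b)
              (max (p.getD (a, b) 0) (min (p.getD (a, x) 0) (p.getD (x, b) 0)))
          else p)
        (PySem.Dict.mk (pvCanonS N w)) =
      PySem.Dict.mk (pvCanonS N (fun i j => if i = a ∧ j ∈ js then stepFS f x i j else w i j)) := by
  intro js
  induction js with
  | nil =>
    intro w _ _ _ _
    simp only [List.foldl_nil]
    exact congrArg PySem.Dict.mk (canonS_congr N _ _ (by intro i _ j _ _; simp))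
  | cons b t ih =>
    intro w hjs hwax hwx hwj
    have hbN : b ∈ N := hjs b (by simp)
    simp only [List.foldl_cons]
    by_cases hg : x ≠ b ∧ a ≠ b
    · rw [if_pos hg]
      have r1 : (PySem.Dict.mk (pvCanonS N w)).getD (a, b) 0 = w a b :=
        canonS_getD N hN w ha hbN hg.2
      have r2 : (PySem.Dict.mk (pvCanonS N w)).getD (a, x) 0 = f a x := by
        rw [canonS_getD N hN w ha hx hax]; exact hwax
      have r3 : (PySem.Dict.mk (pvCanonS N w)).getD (x, b) 0 = f x b := by
        rw [canonS_getD N hN w hx hbN hg.1]; exact hwx b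
      rw [r1, r2, r3]
      have hval : max (w a b) (min (f a x) (f x b)) = stepFS f x a b := by
        have hguard : a ≠ b ∧ a ≠ x ∧ b ≠ x := ⟨hg.2, hax, fun e => hg.1 e.symm⟩
        rcases hwj b (by simp) with h | h
        · rw [h]
          unfold stepFS
          rw [if_pos hguard]
        · rw [h]
          unfold stepFS
          rw [if_pos hguard, max_assoc, max_self]
      rw [hval]
      rw [canonS_insert N hN w ha hbN hg.2 (stepFS f x a b)]
      have h1' : (fun i j => if i = a ∧ j = b then stepFS f x a b else w i j) a x = f a x := by
        show (if a = a ∧ x = b then stepFS f x a b else w a x) = f a x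
        rw [if_neg (fun e => hg.1 e.2)]
        exact hwax
      have h2' : ∀ b', (fun i j => if i = a ∧ j = b then stepFS f x a b else w i j) x b' = f x b' := by
        intro b'
        show (if x = a ∧ b' = b then stepFS f x a b else w x b') = f x b'
        rw [if_neg (fun e => hax e.1.symm)]
        exact hwx b'
      have h3' : ∀ j ∈ t, (fun i j => if i = a ∧ j = b then stepFS f x a b else w i j) a j = f a j ∨
          (fun i j => if i = a ∧ j = b then stepFS f x a b else w i j) a j = stepFS f x a j := by
        intro j hj
        show (if a = a ∧ j = b then stepFS f x a b else w a j) = f a j ∨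
             (if a = a ∧ j = b then stepFS f x a b else w a j) = stepFS f x a j
        by_cases hjb : j = b
        · right
          rw [if_pos ⟨rfl, hjb⟩, hjb]
        · rw [if_neg (fun e => hjb e.2)]
          exact hwj j (by simp [hj])
      rw [ih _ (fun j hj => hjs j (by simp [hj])) h1' h2' h3']
      refine congrArg PySem.Dict.mk (canonS_congr N _ _ ?_)
      intro x0 hx0N y0 hy0N hx0y0
      by_cases hx0 : x0 = a
      · by_cases hy0t : y0 ∈ t
        · rw [if_pos ⟨hx0, hy0t⟩, if_pos ⟨hx0, by simp [hy0t]⟩]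
        · by_cases hy0b : y0 = b
          · rw [if_neg (fun e => hy0t e.2),
              if_pos (show x0 = a ∧ y0 = b from ⟨hx0, hy0b⟩),
              if_pos (show x0 = a ∧ y0 ∈ b :: t from ⟨hx0, by simp [hy0b]⟩), hx0, hy0b]
          · rw [if_neg (fun e => hy0t e.2),
              if_neg (show ¬(x0 = a ∧ y0 = b) from fun e => hy0b e.2),
              if_neg (show ¬(x0 = a ∧ y0 ∈ b :: t) from
                fun e => (List.mem_cons.mp e.2).elim hy0b hy0t)]
      · rw [if_neg (fun e => hx0 e.1), if_neg (fun e => hx0 e.1), if_neg (fun e => hx0 e.1)]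
    · rw [if_neg hg]
      rw [ih w (fun j hj => hjs j (by simp [hj])) hwax hwx (fun j hj => hwj j (by simp [hj]))]
      refine congrArg PySem.Dict.mk (canonS_congr N _ _ ?_)
      intro x0 hx0N y0 hy0N hx0y0
      by_cases hx0 : x0 = a
      · by_cases hy0t : y0 ∈ t
        · rw [if_pos ⟨hx0, hy0t⟩, if_pos ⟨hx0, by simp [hy0t]⟩]
        · by_cases hy0b : y0 = b
          · have hab' : a ≠ b := fun e => hx0y0 (hx0.trans (e.trans hy0b.symm))
            have hxb : x = b := by
              rcases not_and_or.mp hg with h | h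
              · exact not_not.mp h
              · exact absurd (not_not.mp h) hab'
            have hsb : stepFS f x a b = f a b := by
              unfold stepFS
              rw [if_neg (fun hc => hc.2.2 hxb.symm)]
            rw [if_neg (fun e => hy0t e.2),
              if_pos (show x0 = a ∧ y0 ∈ b :: t from ⟨hx0, by simp [hy0b]⟩), hx0, hy0b, hsb]
            rcases hwj b (by simp) with h | h
            · exact h
            · rw [h, hsb]
          · rw [if_neg (fun e => hy0t e.2),
              if_neg (fun e => (List.mem_cons.mp e.2).elim hy0b hy0t)]
      · rw [if_neg (fun e => hx0 e.1), if_neg (fun e => hx0 e.1)]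

theorem midS (N : List String) (hN : N.Nodup) (l : List String)
    (hl : ∀ y ∈ l, y ∈ N) (hNl : ∀ y ∈ N, y ∈ l) (f : String → String → Int)
    (x : String) (hx : x ∈ N) :
    ∀ (as : List String) (w : String → String → Int),
      (∀ a ∈ as, a ∈ N) →
      (∀ b, w x b = f x b) →
      (∀ a ∈ as, ∀ j, w a j = f a j ∨ w a j = stepFS f x a j) →
      as.foldl (fun p a =>
          if x ≠ a then
            l.foldl (fun p b =>
              if x ≠ b ∧ a ≠ b then
                p.insert (a, b)
                  (max (p.getD (a, b) 0) (min (p.getD (a, x) 0) (p.getD (x, b) 0)))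
              else p) p
          else p)
        (PySem.Dict.mk (pvCanonS N w)) =
      PySem.Dict.mk (pvCanonS N (fun i j => if i ∈ as then stepFS f x i j else w i j)) := by
  intro as
  induction as with
  | nil =>
    intro w _ _ _
    simp only [List.foldl_nil]
    exact congrArg PySem.Dict.mk (canonS_congr N _ _ (by intro i _ j _ _; simp))
  | cons a t ih =>
    intro w has hwx hrows
    have haN : a ∈ N := has a (by simp)
    simp only [List.foldl_cons]
    by_cases hg : x ≠ a
    · rw [if_pos hg]
      have hax : a ≠ x := fun e => hg e.symm
      have hwax : w a x = f a x := by
        rcases hrows a (by simp) x with h | h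
        · exact h
        · rw [h]
          unfold stepFS
          rw [if_neg (fun hc => hc.2.2 rfl)]
      rw [innerS N hN f x a hx haN hax l w hl hwax hwx (fun j _ => hrows a (by simp) j)]
      have hwx1 : ∀ b, (fun i j => if i = a ∧ j ∈ l then stepFS f x i j else w i j) x b = f x b := by
        intro b
        show (if x = a ∧ b ∈ l then stepFS f x x b else w x b) = f x b
        rw [if_neg (fun e => hg e.1)]
        exact hwx b
      have hrows1 : ∀ r ∈ t, ∀ j,
          (fun i j => if i = a ∧ j ∈ l then stepFS f x i j else w i j) r j = f r j ∨
          (fun i j => if i = a ∧ j ∈ l then stepFS f x i j else w i j) r j = stepFS f x r j := by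
        intro r hr j
        show (if r = a ∧ j ∈ l then stepFS f x r j else w r j) = f r j ∨
             (if r = a ∧ j ∈ l then stepFS f x r j else w r j) = stepFS f x r j
        by_cases hc : r = a ∧ j ∈ l
        · right; rw [if_pos hc]
        · rw [if_neg hc]
          exact hrows r (by simp [hr]) j
      rw [ih _ (fun r hr => has r (by simp [hr])) hwx1 hrows1]
      refine congrArg PySem.Dict.mk (canonS_congr N _ _ ?_)
      intro x0 hx0N y0 hy0N _
      by_cases hx0t : x0 ∈ t
      · rw [if_pos hx0t, if_pos (by simp [hx0t])]
      · by_cases hx0a : x0 = a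
        · rw [if_neg hx0t, if_pos ⟨hx0a, hNl y0 hy0N⟩, if_pos (by simp [hx0a]), hx0a]
        · rw [if_neg hx0t, if_neg (fun e => hx0a e.1),
            if_neg (fun e => (List.mem_cons.mp e).elim hx0a hx0t)]
    · rw [if_neg hg]
      have hxa : x = a := not_not.mp (fun h => hg (fun e => h e))
      rw [ih w (fun r hr => has r (by simp [hr])) hwx (fun r hr j => hrows r (by simp [hr]) j)]
      refine congrArg PySem.Dict.mk (canonS_congr N _ _ ?_)
      intro x0 hx0N y0 hy0N _
      by_cases hx0t : x0 ∈ t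
      · rw [if_pos hx0t, if_pos (by simp [hx0t])]
      · by_cases hx0a : x0 = a
        · have hsb : stepFS f x x0 y0 = f x0 y0 := by
            unfold stepFS
            rw [if_neg (fun hc => hc.2.1 (hx0a.trans hxa.symm))]
          rw [if_neg hx0t, if_pos (by simp [hx0a]), hsb, hx0a, ← hxa]
          exact hwx y0
        · rw [if_neg hx0t, if_neg (fun e => (List.mem_cons.mp e).elim hx0a hx0t)]

theorem passS (names : List String) (f : String → String → Int)
    (x : String) (hx : x ∈ names) :
    names.foldl (fun p c2 =>
        if x ≠ c2 then
          names.foldl (fun p c3 =>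
            if x ≠ c3 ∧ c2 ≠ c3 then
              p.insert (c2, c3)
                (max (p.getD (c2, c3) 0) (min (p.getD (c2, x) 0) (p.getD (x, c3) 0)))
            else p) p
        else p)
      (PySem.Dict.mk (pvCanonS (pvUniq names) f)) =
    PySem.Dict.mk (pvCanonS (pvUniq names) (stepFS f x)) := by
  rw [midS (pvUniq names) (pvUniq_nodup names) names
    (fun y hy => (mem_pvUniq names y).mpr hy) (fun y hy => (mem_pvUniq names y).mp hy)
    f x ((mem_pvUniq names x).mpr hx) names f
    (fun a ha => (mem_pvUniq names a).mpr ha) (fun b => rfl) (fun a _ j => Or.inl rfl)]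
  refine congrArg PySem.Dict.mk (canonS_congr _ _ _ ?_)
  intro x0 hx0N _ _ _
  rw [if_pos ((mem_pvUniq names x0).mp hx0N)]

theorem phase2S (names : List String) :
    ∀ (ks : List String) (f : String → String → Int), (∀ k ∈ ks, k ∈ names) →
      ks.foldl (fun p c1 =>
          names.foldl (fun p c2 =>
            if c1 ≠ c2 then
              names.foldl (fun p c3 =>
                if c1 ≠ c3 ∧ c2 ≠ c3 then
                  p.insert (c2, c3)
                    (max (p.getD (c2, c3) 0) (min (p.getD (c2, c1) 0) (p.getD (c1, c3) 0)))
                else p) p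
            else p) p)
        (PySem.Dict.mk (pvCanonS (pvUniq names) f)) =
      PySem.Dict.mk (pvCanonS (pvUniq names) (ks.foldl stepFS f)) := by
  intro ks
  induction ks with
  | nil => intro f _; rfl
  | cons k t ih =>
    intro f hks
    simp only [List.foldl_cons]
    rw [passS names f k (hks k (by simp))]
    exact ih (stepFS f k) (fun a ha => hks a (by simp [ha]))

-- ---------- repeated pivots are no-ops: the widest-path pass invariant ----------

def pvInv (f : String → String → Int) (y : String) : Prop :=
  ∀ a b, a ≠ b → a ≠ y → b ≠ y → min (f a y) (f y b) ≤ f a b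

theorem stepFS_noop (f : String → String → Int) (x : String) (h : pvInv f x) :
    stepFS f x = f := by
  funext a b
  unfold stepFS
  by_cases hc : a ≠ b ∧ a ≠ x ∧ b ≠ x
  · rw [if_pos hc]
    exact max_eq_left (h a b hc.1 hc.2.1 hc.2.2)
  · rw [if_neg hc]

theorem pvInv_self (f : String → String → Int) (x : String) : pvInv (stepFS f x) x := by
  intro a b hab hax hbx
  have e1 : stepFS f x a x = f a x := by
    unfold stepFS; rw [if_neg (fun hc => hc.2.2 rfl)]
  have e2 : stepFS f x x b = f x b := by
    unfold stepFS; rw [if_neg (fun hc => hc.2.1 rfl)]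
  have e3 : stepFS f x a b = max (f a b) (min (f a x) (f x b)) := by
    unfold stepFS; rw [if_pos ⟨hab, hax, hbx⟩]
  rw [e1, e2, e3]
  exact le_max_right _ _

theorem pvInv_pres (f : String → String → Int) (x y : String) (h : pvInv f y) :
    pvInv (stepFS f x) y := by
  intro a b hab hay hby
  by_cases hxy : x = y
  · have e1 : stepFS f x a y = f a y := by
      unfold stepFS; rw [if_neg (fun hc => hc.2.2 hxy.symm)]
    have e2 : stepFS f x y b = f y b := by
      unfold stepFS; rw [if_neg (fun hc => hc.2.1 hxy.symm)]
    have e3 : stepFS f x a b = max (f a b) (min (f a x) (f x b)) := by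
      unfold stepFS; rw [if_pos ⟨hab, fun e => hay (e.trans hxy), fun e => hby (e.trans hxy)⟩]
    have h1 := h a b hab hay hby
    rw [e1, e2, e3]
    simp only [min_def, max_def] at h1 ⊢
    split_ifs at h1 ⊢ <;> omega
  · by_cases hax : a = x
    · have e1 : stepFS f x a y = f a y := by
        unfold stepFS; rw [if_neg (fun hc => hc.2.1 hax)]
      have e3 : stepFS f x a b = f a b := by
        unfold stepFS; rw [if_neg (fun hc => hc.2.1 hax)]
      by_cases hbx : b = x
      · have e2 : stepFS f x y b = f y b := by
          unfold stepFS; rw [if_neg (fun hc => hc.2.2 hbx)]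
        rw [e1, e2, e3]
        exact h a b hab hay hby
      · have e2 : stepFS f x y b = max (f y b) (min (f y x) (f x b)) := by
          unfold stepFS
          rw [if_pos ⟨fun e => hby e.symm, fun e => hxy e.symm, hbx⟩]
        have h1 := h a b hab hay hby
        have h2 := h x b (fun e => hbx e.symm) (fun e => hxy e) hby
        rw [e1, e2, e3, hax] at *
        simp only [min_def, max_def] at h1 h2 ⊢
        split_ifs at h1 h2 ⊢ <;> omega
    · by_cases hbx : b = x
      · have e2 : stepFS f x y b = f y b := by
          unfold stepFS; rw [if_neg (fun hc => hc.2.2 hbx)]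
        have e3 : stepFS f x a b = f a b := by
          unfold stepFS; rw [if_neg (fun hc => hc.2.2 hbx)]
        have e1 : stepFS f x a y = max (f a y) (min (f a x) (f x y)) := by
          unfold stepFS
          rw [if_pos ⟨hay, hax, fun e => hxy e.symm⟩]
        have h1 := h a b hab hay hby
        have h2 := h a x hax hay hxy
        rw [e1, e2, e3, hbx] at *
        simp only [min_def, max_def] at h1 h2 ⊢
        split_ifs at h1 h2 ⊢ <;> omega
      · have e1 : stepFS f x a y = max (f a y) (min (f a x) (f x y)) := by
          unfold stepFS
          rw [if_pos ⟨hay, hax, fun e => hxy e.symm⟩]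
        have e2 : stepFS f x y b = max (f y b) (min (f y x) (f x b)) := by
          unfold stepFS
          rw [if_pos ⟨fun e => hby e.symm, fun e => hxy e.symm, hbx⟩]
        have e3 : stepFS f x a b = max (f a b) (min (f a x) (f x b)) := by
          unfold stepFS
          rw [if_pos ⟨hab, hax, hbx⟩]
        have h1 := h a b hab hay hby
        have h2 := h a x hax hay hxy
        have h3 := h x b (fun e => hbx e.symm) hxy hby
        rw [e1, e2, e3]
        simp only [min_def, max_def] at h1 h2 h3 ⊢
        split_ifs at h1 h2 h3 ⊢ <;> omega

theorem pure_dedup (names : List String) (f : String → String → Int) :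
    names.foldl stepFS f = (pvUniq names).foldl stepFS f := by
  rw [pvUniq_eq]
  exact foldl_dedup stepFS (fun _ => True) (fun f x => pvInv f x)
    (fun _ _ _ => trivial)
    (fun s x _ hP => stepFS_noop s x hP)
    (fun s x _ => pvInv_self s x)
    (fun s x y _ hP => pvInv_pres s x y hP)
    names [] f trivial (by simp)

theorem portA_items (d : List (String × String × Int)) (names : List String) :
    compute_p_py d names =
      (pvCanonS (pvUniq names) ((pvUniq names).foldl stepFS
        (fun x y => pvDirect d x y))).map (fun q => (q.1.1, q.1.2, q.2)) := by
  simp only [compute_p_py]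
  have hbody : (fun (p : PySem.Dict (String × String) Int) (c1 : String) =>
      names.foldl (fun p c2 => if c1 ≠ c2 then
        (if pvDget d (c1, c2) > pvDget d (c2, c1) then p.insert (c1, c2) (pvDget d (c1, c2))
         else p.insert (c1, c2) 0)
        else p) p)
      = (fun p c1 => names.foldl (fun p c2 => if c1 ≠ c2 then p.insert (c1, c2) (pvDirect d c1 c2) else p) p) := by
    funext p c1
    congr 1
    funext p' c2
    by_cases h1 : c1 ≠ c2
    · by_cases h2 : pvDget d (c1, c2) > pvDget d (c2, c1) <;> simp [pvDirect, h1, h2]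
    · simp [h1]
  rw [hbody, phase1_total d names]
  rw [phase2S names names (pvDirect d) (fun k hk => hk)]
  rw [pure_dedup names (fun x y => pvDirect d x y)]

-- ---------- B side: basic facts about the fold result F of A ----------

theorem stepFS_ge (f : String → String → Int) (x a b : String) : f a b ≤ stepFS f x a b := by
  unfold stepFS
  by_cases hc : a ≠ b ∧ a ≠ x ∧ b ≠ x
  · rw [if_pos hc]; exact le_max_left _ _
  · rw [if_neg hc]

theorem foldl_stepFS_ge : ∀ (K : List String) (f : String → String → Int) (a b : String),
    f a b ≤ (K.foldl stepFS f) a b := by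
  intro K
  induction K with
  | nil => intro f a b; exact le_refl _
  | cons k t ih =>
    intro f a b
    simp only [List.foldl_cons]
    exact le_trans (stepFS_ge f k a b) (ih (stepFS f k) a b)

theorem pvInv_foldl : ∀ (K : List String) (f : String → String → Int) (y : String),
    pvInv f y → pvInv (K.foldl stepFS f) y := by
  intro K
  induction K with
  | nil => intro f y h; exact h
  | cons k t ih =>
    intro f y h
    simp only [List.foldl_cons]
    exact ih (stepFS f k) y (pvInv_pres f k y h)

theorem pvInv_F : ∀ (K : List String) (f : String → String → Int) (x : String), x ∈ K →
    pvInv (K.foldl stepFS f) x := by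
  intro K
  induction K with
  | nil => intro f x hx; exact absurd hx (List.not_mem_nil)
  | cons k t ih =>
    intro f x hx
    simp only [List.foldl_cons]
    by_cases hxk : x = k
    · subst hxk
      exact pvInv_foldl t (stepFS f x) x (pvInv_self f x)
    · exact ih (stepFS f k) x (by rcases List.mem_cons.mp hx with h | h; exact absurd h hxk; exact h)

theorem pvDirect_self (d : List (String × String × Int)) (u : String) : pvDirect d u u = 0 := by
  unfold pvDirect
  rw [if_neg (lt_irrefl _)]

-- ---------- B side: getD characterizations of the dict folds ----------

theorem width0_getD (d : List (String × String × Int)) (v : String) :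
    ∀ (ts : List String) (dd : PySem.Dict String Int) (w : String),
      (ts.foldl (fun dd w => dd.insert w (pvDirect d v w)) dd).getD w 0 =
        if w ∈ ts then pvDirect d v w else dd.getD w 0 := by
  intro ts
  induction ts with
  | nil => intro dd w; simp
  | cons x t ih =>
    intro dd w
    simp only [List.foldl_cons]
    rw [ih]
    by_cases hwt : w ∈ t
    · rw [if_pos hwt, if_pos (by simp [hwt])]
    · rw [if_neg hwt, PySem.Dict.getD_insert]
      by_cases hwx : w = x
      · rw [if_pos hwx, if_pos (by simp [hwx]), hwx]
      · rw [if_neg hwx, if_neg (by simp [hwx, hwt])]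

theorem relax_getD (d : List (String × String × Int)) (u : String) (wu : Int) :
    ∀ (ts : List String) (dd : PySem.Dict String Int) (w : String),
      (ts.foldl (fun dd w =>
          let cand := min wu (pvDirect d u w)
          if cand > dd.getD w 0 then dd.insert w cand else dd) dd).getD w 0 =
        if w ∈ ts then max (dd.getD w 0) (min wu (pvDirect d u w)) else dd.getD w 0 := by
  intro ts
  induction ts with
  | nil => intro dd w; simp
  | cons x t ih =>
    intro dd w
    simp only [List.foldl_cons]
    rw [ih]
    have hx : (if min wu (pvDirect d u x) > dd.getD x 0 then dd.insert x (min wu (pvDirect d u x)) else dd).getD w 0 =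
        if w = x then max (dd.getD x 0) (min wu (pvDirect d u x)) else dd.getD w 0 := by
      by_cases hc : min wu (pvDirect d u x) > dd.getD x 0
      · rw [if_pos hc, PySem.Dict.getD_insert]
        by_cases hwx : w = x
        · rw [if_pos hwx, if_pos hwx]
          omega
        · rw [if_neg hwx, if_neg hwx]
      · rw [if_neg hc]
        by_cases hwx : w = x
        · rw [if_pos hwx, hwx]
          omega
        · rw [if_neg hwx]
    show (if w ∈ t then max ((if min wu (pvDirect d u x) > dd.getD x 0 then dd.insert x (min wu (pvDirect d u x)) else dd).getD w 0) (min wu (pvDirect d u w))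
          else (if min wu (pvDirect d u x) > dd.getD x 0 then dd.insert x (min wu (pvDirect d u x)) else dd).getD w 0) =
        if w ∈ x :: t then max (dd.getD w 0) (min wu (pvDirect d u w)) else dd.getD w 0
    rw [hx]
    by_cases hwx : w = x
    · subst hwx
      by_cases hwt : w ∈ t
      · rw [if_pos hwt, if_pos rfl, if_pos (by simp [hwt])]
        omega
      · rw [if_neg hwt, if_pos rfl, if_pos (by simp)]
    · by_cases hwt : w ∈ t
      · rw [if_pos hwt, if_neg hwx, if_pos (by simp [hwt])]
      · rw [if_neg hwt, if_neg hwx, if_neg (by simp [hwx, hwt])]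

-- ---------- B side: generic induction over the settle loop ----------

theorem pvRun_ind (d : List (String × String × Int)) (targets : List String)
    (P : PySem.Dict String Int → List String → Prop)
    (hstep : ∀ (width : PySem.Dict String Int) (us : List String) (u : String),
      PySem.List.max? us (fun t => width.getD t 0) = some u → u ∈ us → P width us →
      P (targets.foldl (fun dd w =>
          let cand := min (width.getD u 0) (pvDirect d u w)
          if cand > dd.getD w 0 then dd.insert w cand else dd) width) (us.erase u)) :
    ∀ (n : Nat) (us : List String) (width : PySem.Dict String Int), us.length = n →
      P width us → P (pvRun d targets n width us) [] := by
  intro n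
  induction n with
  | zero =>
    intro us width hlen hP
    have : us = [] := List.eq_nil_of_length_eq_zero hlen
    subst this
    simpa [pvRun] using hP
  | succ m ih =>
    intro us width hlen hP
    have hne : us ≠ [] := by
      intro h; subst h; simp at hlen
    obtain ⟨u, hmax⟩ : ∃ u, PySem.List.max? us (fun t => width.getD t 0) = some u := by
      cases hm : PySem.List.max? us (fun t => width.getD t 0) with
      | none => exact absurd ((PySem.List.max?_eq_none_iff _ _).mp hm) hne
      | some u => exact ⟨u, rfl⟩
    have hmem : u ∈ us := PySem.List.max?_mem hmax
    have hrem : PySem.List.remove? us u = some (us.erase u) :=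
      PySem.List.remove?_eq_some_erase us u hmem
    have hlen' : (us.erase u).length = m := by
      rw [List.length_erase_of_mem hmem, hlen]
      rfl
    simp only [pvRun, hmax, hrem, Option.getD_some]
    exact ih _ _ hlen' (hstep width us u hmax hmem hP)

-- ---------- B side: proof-level names for B's per-source pieces ----------

def pvTgt (N : List String) (v : String) : List String := N.filter (fun w => decide (w ≠ v))

def pvBfun (d : List (String × String × Int)) (N : List String) (v : String) : String → Int :=
  fun w =>
    (pvRun d (pvTgt N v) (pvTgt N v).length
      ((pvTgt N v).foldl (fun dd w => dd.insert w (pvDirect d v w)) PySem.Dict.empty)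
      (pvTgt N v)).getD w 0

theorem mem_pvTgt (N : List String) (v w : String) : w ∈ pvTgt N v ↔ w ∈ N ∧ w ≠ v := by
  unfold pvTgt
  simp [List.mem_filter]

theorem pvTgt_nodup (N : List String) (hN : N.Nodup) (v : String) : (pvTgt N v).Nodup :=
  List.Nodup.filter _ hN

-- the per-source run invariant, instantiated
theorem pvB_run_facts (d : List (String × String × Int)) (N : List String) (hN : N.Nodup)
    (v : String) (_hv : v ∈ N) :
    (∀ w ∈ pvTgt N v, pvBfun d N v w ≤ (N.foldl stepFS (fun x y => pvDirect d x y)) v w) ∧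
    (∀ w ∈ pvTgt N v, pvDirect d v w ≤ pvBfun d N v w) ∧
    (∀ s ∈ pvTgt N v, ∀ w ∈ pvTgt N v, min (pvBfun d N v s) (pvDirect d s w) ≤ pvBfun d N v w) := by
  have hTnd := pvTgt_nodup N hN v
  have hrun := pvRun_ind d (pvTgt N v)
    (fun width us =>
      (∀ t ∈ us, t ∈ pvTgt N v) ∧ us.Nodup ∧
      (∀ w ∈ pvTgt N v, width.getD w 0 ≤ (N.foldl stepFS (fun x y => pvDirect d x y)) v w) ∧
      (∀ w ∈ pvTgt N v, pvDirect d v w ≤ width.getD w 0) ∧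
      (∀ s ∈ pvTgt N v, s ∉ us →
        (∀ w ∈ pvTgt N v, min (width.getD s 0) (pvDirect d s w) ≤ width.getD w 0) ∧
        (∀ w ∈ us, width.getD w 0 ≤ width.getD s 0)))
    ?_ (pvTgt N v).length (pvTgt N v)
    ((pvTgt N v).foldl (fun dd w => dd.insert w (pvDirect d v w)) PySem.Dict.empty)
    rfl ?_
  · obtain ⟨-, -, h1, h2, h3⟩ := hrun
    refine ⟨h1, h2, ?_⟩
    intro s hs w hw
    exact ((h3 s hs (List.not_mem_nil)).1) w hw
  · -- step preservation
    intro width us u hmax hmem hP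
    obtain ⟨hus, hnd, hle, hlb, hset⟩ := hP
    have hkey : ∀ t ∈ us, width.getD t 0 ≤ width.getD u 0 := by
      intro t ht
      exact PySem.List.max?_isMax hmax t ht
    have huT : u ∈ pvTgt N v := hus u hmem
    have huN : u ∈ N := ((mem_pvTgt N v u).mp huT).1
    have huv : u ≠ v := ((mem_pvTgt N v u).mp huT).2
    have hg' : ∀ w, (List.foldl (fun dd w =>
          let cand := min (width.getD u 0) (pvDirect d u w)
          if cand > dd.getD w 0 then dd.insert w cand else dd) width (pvTgt N v)).getD w 0 =
        if w ∈ pvTgt N v then max (width.getD w 0) (min (width.getD u 0) (pvDirect d u w))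
        else width.getD w 0 := fun w => relax_getD d u (width.getD u 0) (pvTgt N v) width w
    -- the settled invariant gives that settled values dominate u's width
    have hdomu : ∀ s ∈ pvTgt N v, s ∉ us → width.getD u 0 ≤ width.getD s 0 := by
      intro s hsT hsus
      exact (hset s hsT hsus).2 u hmem
    refine ⟨?_, List.Nodup.erase u hnd, ?_, ?_, ?_⟩
    · intro t ht
      exact hus t (List.mem_of_mem_erase ht)
    · -- upper bound by A's fold
      intro w hw
      rw [hg', if_pos hw]
      have hwN : w ∈ N := ((mem_pvTgt N v w).mp hw).1
      have hwv : w ≠ v := ((mem_pvTgt N v w).mp hw).2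
      have h1 := hle w hw
      have h2 := hle u huT
      by_cases hwu : w = u
      · subst hwu
        have := pvDirect_self d w
        omega
      · have h3 : pvDirect d u w ≤ (N.foldl stepFS (fun x y => pvDirect d x y)) u w :=
          foldl_stepFS_ge N (fun x y => pvDirect d x y) u w
        have h4 := pvInv_F N (fun x y => pvDirect d x y) u huN v w
          (fun e => hwv e.symm) (fun e => huv e.symm) hwu
        omega
    · -- lower bound p0 v ·
      intro w hw
      rw [hg', if_pos hw]
      have := hlb w hw
      omega
    · -- settled facts
      intro s hsT hser
      have hfrozen : ∀ s' ∈ pvTgt N v, s' ∉ us.erase u →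
          min (width.getD u 0) (pvDirect d u s') ≤ width.getD s' 0 := by
        intro s' hs'T hs'
        by_cases hs'u : s' = u
        · subst hs'u
          have := pvDirect_self d s'
          omega
        · have hs'us : s' ∉ us := by
            intro hmem'
            exact hs' ((List.Nodup.mem_erase_iff hnd).mpr ⟨hs'u, hmem'⟩)
          have := hdomu s' hs'T hs'us
          omega
      have hgs : (List.foldl (fun dd w =>
          let cand := min (width.getD u 0) (pvDirect d u w)
          if cand > dd.getD w 0 then dd.insert w cand else dd) width (pvTgt N v)).getD s 0 =
          width.getD s 0 := by
        rw [hg', if_pos hsT]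
        have := hfrozen s hsT hser
        omega
      constructor
      · intro w hw
        rw [hgs, hg', if_pos hw]
        by_cases hsu : s = u
        · subst hsu
          omega
        · have hsus : s ∉ us := by
            intro hmem'
            exact hser ((List.Nodup.mem_erase_iff hnd).mpr ⟨hsu, hmem'⟩)
          have := (hset s hsT hsus).1 w hw
          omega
      · intro w hw
        have hwus : w ∈ us := List.mem_of_mem_erase hw
        have hwT : w ∈ pvTgt N v := hus w hwus
        rw [hgs, hg', if_pos hwT]
        have h1 := hkey w hwus
        by_cases hsu : s = u
        · subst hsu
          omega
        · have hsus : s ∉ us := by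
            intro hmem'
            exact hser ((List.Nodup.mem_erase_iff hnd).mpr ⟨hsu, hmem'⟩)
          have h2 := (hset s hsT hsus).2 w hwus
          have h3 := hdomu s hsT hsus
          omega
  · -- initial state
    have hg0 : ∀ w, ((pvTgt N v).foldl (fun dd w => dd.insert w (pvDirect d v w)) PySem.Dict.empty).getD w 0 =
        if w ∈ pvTgt N v then pvDirect d v w else 0 := by
      intro w
      rw [width0_getD d v (pvTgt N v) PySem.Dict.empty w]
      simp
    refine ⟨fun t ht => ht, hTnd, ?_, ?_, ?_⟩
    · intro w hw
      rw [hg0, if_pos hw]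
      exact foldl_stepFS_ge N (fun x y => pvDirect d x y) v w
    · intro w hw
      rw [hg0, if_pos hw]
    · intro s hsT hsus
      exact absurd hsT hsus

-- cross-source transitivity of B's result
theorem pvB_trans (d : List (String × String × Int)) (N : List String) (hN : N.Nodup)
    (v x w : String) (hv : v ∈ N) (hx : x ∈ N) (hw : w ∈ N)
    (hxv : x ≠ v) (hwx : w ≠ x) (hwv : w ≠ v) :
    min (pvBfun d N v x) (pvBfun d N x w) ≤ pvBfun d N v w := by
  obtain ⟨-, hR4, hR2⟩ := pvB_run_facts d N hN v hv
  have hxTv : x ∈ pvTgt N v := (mem_pvTgt N v x).mpr ⟨hx, hxv⟩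
  have hwTv : w ∈ pvTgt N v := (mem_pvTgt N v w).mpr ⟨hw, hwv⟩
  have hwTx : w ∈ pvTgt N x := (mem_pvTgt N x w).mpr ⟨hw, hwx⟩
  have hrun := pvRun_ind d (pvTgt N x)
    (fun width us =>
      (∀ t ∈ us, t ∈ pvTgt N x) ∧
      (∀ t ∈ pvTgt N x, t ≠ v → min (pvBfun d N v x) (width.getD t 0) ≤ pvBfun d N v t))
    ?_ (pvTgt N x).length (pvTgt N x)
    ((pvTgt N x).foldl (fun dd w => dd.insert w (pvDirect d x w)) PySem.Dict.empty)
    rfl ?_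
  · exact (hrun.2) w hwTx hwv
  · -- step preservation
    intro width us u hmax hmem hP
    obtain ⟨hus, hIH⟩ := hP
    have huTx : u ∈ pvTgt N x := hus u hmem
    have huN : u ∈ N := ((mem_pvTgt N x u).mp huTx).1
    have hg' : ∀ t, (List.foldl (fun dd w =>
          let cand := min (width.getD u 0) (pvDirect d u w)
          if cand > dd.getD w 0 then dd.insert w cand else dd) width (pvTgt N x)).getD t 0 =
        if t ∈ pvTgt N x then max (width.getD t 0) (min (width.getD u 0) (pvDirect d u t))
        else width.getD t 0 := fun t => relax_getD d u (width.getD u 0) (pvTgt N x) width t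
    refine ⟨fun t ht => hus t (List.mem_of_mem_erase ht), ?_⟩
    intro t htTx htv
    rw [hg', if_pos htTx]
    have h1 := hIH t htTx htv
    by_cases huv' : u = v
    · subst huv'
      have h2 : pvDirect d u t ≤ pvBfun d N u t :=
        hR4 t ((mem_pvTgt N u t).mpr ⟨((mem_pvTgt N x t).mp htTx).1, htv⟩)
      omega
    · by_cases hut : u = t
      · subst hut
        have := pvDirect_self d u
        omega
      · have h3 := hIH u huTx huv'
        have h4 : min (pvBfun d N v u) (pvDirect d u t) ≤ pvBfun d N v t :=
          hR2 u ((mem_pvTgt N v u).mpr ⟨huN, huv'⟩) t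
            ((mem_pvTgt N v t).mpr ⟨((mem_pvTgt N x t).mp htTx).1, htv⟩)
        omega
  · -- initial state
    have hg0 : ∀ t, ((pvTgt N x).foldl (fun dd w => dd.insert w (pvDirect d x w)) PySem.Dict.empty).getD t 0 =
        if t ∈ pvTgt N x then pvDirect d x t else 0 := by
      intro t
      rw [width0_getD d x (pvTgt N x) PySem.Dict.empty t]
      simp
    refine ⟨fun t ht => ht, ?_⟩
    intro t htTx htv
    rw [hg0, if_pos htTx]
    exact hR2 x hxTv t ((mem_pvTgt N v t).mpr ⟨((mem_pvTgt N x t).mp htTx).1, htv⟩)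

-- A's fold stays below B
theorem F_le_B (d : List (String × String × Int)) (N : List String) (hN : N.Nodup) :
    ∀ (K : List String), (∀ k ∈ K, k ∈ N) → ∀ (f : String → String → Int),
      (∀ v ∈ N, ∀ w ∈ N, v ≠ w → f v w ≤ pvBfun d N v w) →
      ∀ v ∈ N, ∀ w ∈ N, v ≠ w → (K.foldl stepFS f) v w ≤ pvBfun d N v w := by
  intro K
  induction K with
  | nil => intro _ f hf; exact hf
  | cons x t ih =>
    intro hK f hf
    simp only [List.foldl_cons]
    refine ih (fun k hk => hK k (by simp [hk])) (stepFS f x) ?_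
    intro v hv w hw hvw
    unfold stepFS
    by_cases hc : v ≠ w ∧ v ≠ x ∧ w ≠ x
    · rw [if_pos hc]
      have hxN : x ∈ N := hK x (by simp)
      have h1 := hf v hv w hw hvw
      have h2 := hf v hv x hxN hc.2.1
      have h3 := hf x hxN w hw (fun e => hc.2.2 e.symm)
      have h4 := pvB_trans d N hN v x w hv hxN hw (fun e => hc.2.1 e.symm)
        hc.2.2 (fun e => hvw e.symm)
      omega
    · rw [if_neg hc]
      exact hf v hv w hw hvw

-- pointwise equality of the two results
theorem F_eq_B (d : List (String × String × Int)) (N : List String) (hN : N.Nodup)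
    (v w : String) (hv : v ∈ N) (hw : w ∈ N) (hvw : v ≠ w) :
    (N.foldl stepFS (fun x y => pvDirect d x y)) v w = pvBfun d N v w := by
  refine le_antisymm ?_ ?_
  · refine F_le_B d N hN N (fun k hk => hk) (fun x y => pvDirect d x y) ?_ v hv w hw hvw
    intro a ha b hb hab
    exact (pvB_run_facts d N hN a ha).2.1 b ((mem_pvTgt N a b).mpr ⟨hb, fun e => hab e.symm⟩)
  · exact (pvB_run_facts d N hN v hv).1 w ((mem_pvTgt N v w).mpr ⟨hw, fun e => hvw e.symm⟩)

-- ---------- B side: the output dict is built over fresh keys ----------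

theorem outerB (N : List String) (hN : N.Nodup) (val : String → String → Int) :
    ∀ (vs : List String) (L : List ((String × String) × Int)), vs.Nodup →
      (∀ v ∈ vs, ∀ q ∈ L, q.1.1 ≠ v) →
      vs.foldl (fun p v => (pvTgt N v).foldl (fun p w => p.insert (v, w) (val v w)) p)
        (PySem.Dict.mk L) =
      PySem.Dict.mk (L ++ vs.flatMap (fun v => (pvTgt N v).map (fun w => ((v, w), val v w)))) := by
  intro vs
  induction vs with
  | nil => intro L _ _; simp
  | cons v t ih =>
    intro L hnd hfresh
    have hvt : v ∉ t := (List.nodup_cons.mp hnd).1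
    simp only [List.foldl_cons]
    have hinner : (pvTgt N v).foldl (fun p w => p.insert (v, w) (val v w)) (PySem.Dict.mk L) =
        PySem.Dict.mk (L ++ (pvTgt N v).map (fun w => ((v, w), val v w))) := by
      apply PySem.Dict.ext
      have hfr : ∀ w ∈ pvTgt N v, (PySem.Dict.mk L).contains (v, w) = false := by
        intro w _
        rw [PySem.Dict.contains_eq_decide_mem_keys]
        simp only [decide_eq_false_iff_not]
        intro hmem
        obtain ⟨q, hq, hq1⟩ := List.mem_map.mp hmem
        exact (hfresh v (by simp) q hq) (congrArg Prod.fst hq1.symm ▸ rfl)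
      have hknd : ((pvTgt N v).map (fun w => ((v, w) : String × String))).Nodup := by
        apply List.Nodup.map_on
        · intro a _ b _ hab
          exact congrArg Prod.snd hab
        · exact pvTgt_nodup N hN v
      exact PySem.Dict.items_foldl_insert_fresh (pvTgt N v)
        (fun w => ((v, w) : String × String)) (fun w => val v w) (PySem.Dict.mk L) hfr hknd
    rw [hinner]
    rw [ih (L ++ (pvTgt N v).map (fun w => ((v, w), val v w))) (List.nodup_cons.mp hnd).2 ?_]
    · rw [List.flatMap_cons]
      simp [List.append_assoc]
    · intro v' hv' q hq
      rcases List.mem_append.mp hq with hm | hm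
      · exact hfresh v' (by simp [hv']) q hm
      · obtain ⟨w, _, hw⟩ := List.mem_map.mp hm
        have : q.1.1 = v := by rw [← hw]
        rw [this]
        exact fun e => hvt (e ▸ hv')

-- ---------- B side: the output dict is the canonical list ----------

theorem portB_items (d : List (String × String × Int)) (names : List String) :
    compute_p_py_alt d names =
      (pvCanonS (pvUniq names) (fun v w => pvBfun d (pvUniq names) v w)).map
        (fun q => (q.1.1, q.1.2, q.2)) := by
  have hstep : compute_p_py_alt d names =
      ((pvUniq names).foldl (fun p v =>
        (pvTgt (pvUniq names) v).foldl (fun p w => p.insert (v, w) (pvBfun d (pvUniq names) v w)) p)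
        PySem.Dict.empty).items.map (fun q => (q.1.1, q.1.2, q.2)) := rfl
  rw [hstep]
  have he : (PySem.Dict.empty : PySem.Dict (String × String) Int) = PySem.Dict.mk [] := rfl
  rw [he, outerB (pvUniq names) (pvUniq_nodup names) (fun v w => pvBfun d (pvUniq names) v w)
    (pvUniq names) [] (pvUniq_nodup names) (by simp)]
  have hflat : (pvUniq names).flatMap (fun v =>
      (pvTgt (pvUniq names) v).map (fun w => ((v, w), pvBfun d (pvUniq names) v w))) =
      pvCanonS (pvUniq names) (fun v w => pvBfun d (pvUniq names) v w) := by
    unfold pvCanonS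
    apply flatMap_congr'
    intro x _
    have hfil : pvTgt (pvUniq names) x = (pvUniq names).filter (fun y => decide (x ≠ y)) := by
      unfold pvTgt
      apply List.filter_congr
      intro y _
      exact decide_eq_decide.mpr ne_comm
    rw [hfil]
  rw [hflat]
  rfl

-- ===== VERDICT (by name: the statement is the Claim_ definition above) =====
theorem compute_p_py_spec : Claim_equal_compute_p_py := by
  intro d names _
  unfold Spec_compute_p_py
  rw [portA_items d names, portB_items d names]
  refine congrArg (List.map _) (canonS_congr _ _ _ ?_)
  intro x hx y hy hxy
  exact F_eq_B d (pvUniq names) (pvUniq_nodup names) x y hx hy hxy
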